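-- pv_equiv track=rewrite | github.com/Pedrobr89/pickles-backend | backend/services/services_filtros_avancados.py | _filtrar_palavras_chave
-- ===== SOURCE A (Python) =====
-- from typing import Dict, List, Optional, Tuple
--
-- def _filtrar_palavras_chave(
--
--     licitacoes: List[Dict],
--     palavras: str
-- ) -> List[Dict]:
--     """Filtra por palavras-chave no título/objeto"""
--     palavras_list = palavras.lower().split()
--
--     return [
--         l for l in licitacoes
--         if any(
--             palavra in l.get('titulo', '').lower() or
--             palavra in l.get('objeto', '').lower()
--             for palavra in palavras_list
--         )
--     ]
-- ===== SOURCE B (Python) =====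
-- def _filtrar_palavras_chave(licitacoes, palavras):
--     """Traversal invertido: para cada palavra-chave marca os indices dos
--     registros que casam; depois emite os registros marcados na ordem original."""
--     marcados = set()
--     for palavra in palavras.lower().split():
--         for i, l in enumerate(licitacoes):
--             if i not in marcados and (
--                 palavra in l.get('titulo', '').lower()
--                 or palavra in l.get('objeto', '').lower()
--             ):
--                 marcados.add(i)
--     return [l for i, l in enumerate(licitacoes) if i in marcados]
-- ===== Notes on version B (the rewrite author's own statement) =====
-- stated objective: alternative
-- what changed: B inverts the traversal: instead of one pass over the records testing every keyword per record, it loops keywords in the outer loop, marking the index set of matching records (skipping already-marked indices), and then emits the marked records in a final ordered pass.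
import Mathlib
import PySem

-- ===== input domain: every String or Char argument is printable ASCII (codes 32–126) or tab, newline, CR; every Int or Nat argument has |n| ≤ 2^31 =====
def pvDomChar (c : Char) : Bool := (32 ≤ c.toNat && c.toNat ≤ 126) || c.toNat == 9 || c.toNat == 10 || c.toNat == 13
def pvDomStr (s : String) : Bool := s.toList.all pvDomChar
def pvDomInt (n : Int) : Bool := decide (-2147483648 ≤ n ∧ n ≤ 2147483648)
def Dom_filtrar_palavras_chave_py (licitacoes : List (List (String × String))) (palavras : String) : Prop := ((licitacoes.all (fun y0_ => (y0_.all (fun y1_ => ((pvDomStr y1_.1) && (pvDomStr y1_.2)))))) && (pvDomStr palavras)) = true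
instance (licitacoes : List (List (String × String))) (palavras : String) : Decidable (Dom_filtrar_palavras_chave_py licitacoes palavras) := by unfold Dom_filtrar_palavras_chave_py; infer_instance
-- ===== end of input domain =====

-- B inverts the traversal: keywords in the outer loop marking a set of matched record
-- indices, then one ordered pass emitting the marked records (objective: alternative).

-- ===== PORT A =====
def filtrar_palavras_chave_py (licitacoes : List (List (String × String))) (palavras : String) : List (List (String × String)) :=
  let palavras_list := PySem.Str.split₀ (PySem.Str.lower palavras)
  licitacoes.filter (fun l =>
    palavras_list.any (fun palavra =>
      PySem.Str.isIn palavra (PySem.Str.lower (PySem.Dict.getD ⟨l⟩ "titulo" "")) ||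
      PySem.Str.isIn palavra (PySem.Str.lower (PySem.Dict.getD ⟨l⟩ "objeto" ""))))

-- ===== PORT B =====
-- indices are Python ints → Int (PySem.List.enumerate); the set of marked indices is a
-- PySem.Set, consumed only through membership tests, so hash order never matters.
def filtrar_palavras_chave_py_alt (licitacoes : List (List (String × String))) (palavras : String) : List (List (String × String)) :=
  let marcados : PySem.Set Int :=
    (PySem.Str.split₀ (PySem.Str.lower palavras)).foldl (fun marcados palavra =>
      (PySem.List.enumerate licitacoes).foldl (fun marcados il =>
        if !(PySem.Set.contains marcados il.1) &&
            (PySem.Str.isIn palavra (PySem.Str.lower (PySem.Dict.getD ⟨il.2⟩ "titulo" "")) ||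
             PySem.Str.isIn palavra (PySem.Str.lower (PySem.Dict.getD ⟨il.2⟩ "objeto" ""))) then
          PySem.Set.add marcados il.1
        else marcados) marcados) PySem.Set.empty
  (PySem.List.enumerate licitacoes).foldl (fun out il =>
    if PySem.Set.contains marcados il.1 then out ++ [il.2] else out) []

-- ===== PRECONDITION & SPEC =====
def Spec_filtrar_palavras_chave_py (licitacoes : List (List (String × String))) (palavras : String) (out : List (List (String × String))) : Prop := out = filtrar_palavras_chave_py_alt licitacoes palavras
instance (licitacoes : List (List (String × String))) (palavras : String) (out : List (List (String × String))) : Decidable (Spec_filtrar_palavras_chave_py licitacoes palavras out) := by unfold Spec_filtrar_palavras_chave_py; infer_instance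

-- ===== CLAIM (what is proved, stated in full; the proofs are below) =====
def Claim_equal_filtrar_palavras_chave_py : Prop := ∀ (licitacoes : List (List (String × String))) (palavras : String), Dom_filtrar_palavras_chave_py licitacoes palavras → Spec_filtrar_palavras_chave_py licitacoes palavras (filtrar_palavras_chave_py licitacoes palavras)

-- ===== LEMMAS AND PROOFS =====

-- One keyword's inner pass over the enumerated records: membership in the resulting set.
theorem pv_mem_inner {α : Type} (q : α → Bool)
    (es : List (Int × α)) (S : PySem.Set Int) (j : Int) :
    j ∈ es.foldl (fun S il =>
        if !(PySem.Set.contains S il.1) && q il.2 then PySem.Set.add S il.1 else S) S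
      ↔ j ∈ S ∨ ∃ il ∈ es, il.1 = j ∧ q il.2 = true := by
  induction es generalizing S with
  | nil => simp
  | cons p es ih =>
    simp only [List.foldl_cons, List.mem_cons]
    by_cases hc : (!(PySem.Set.contains S p.1) && q p.2) = true
    · rw [if_pos hc, ih]
      simp only [Bool.and_eq_true, Bool.not_eq_true'] at hc
      simp only [PySem.Set.mem_add]
      constructor
      · rintro (⟨h | rfl⟩ | ⟨il, hil, rfl, hq⟩)
        · exact Or.inl h
        · exact Or.inr ⟨p, Or.inl rfl, rfl, hc.2⟩
        · exact Or.inr ⟨il, Or.inr hil, rfl, hq⟩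
      · rintro (h | ⟨il, (rfl | hil), rfl, hq⟩)
        · exact Or.inl (Or.inl h)
        · exact Or.inl (Or.inr rfl)
        · exact Or.inr ⟨il, hil, rfl, hq⟩
    · rw [if_neg hc, ih]
      simp only [Bool.and_eq_true, Bool.not_eq_true', not_and_or, Bool.not_eq_false,
        Bool.not_eq_true] at hc
      constructor
      · rintro (h | ⟨il, hil, rfl, hq⟩)
        · exact Or.inl h
        · exact Or.inr ⟨il, Or.inr hil, rfl, hq⟩
      · rintro (h | ⟨il, (rfl | hil), rfl, hq⟩)
        · exact Or.inl h
        · rcases hc with hc | hc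
          · exact Or.inl ((PySem.Set.contains_iff _ _).mp hc)
          · rw [hq] at hc; cases hc
        · exact Or.inr ⟨il, hil, rfl, hq⟩

-- The whole keyword loop: an index is marked iff some record with that index matches
-- some keyword.
theorem pv_mem_outer {α : Type} (cond : String → α → Bool)
    (ws : List String) (es : List (Int × α)) (S : PySem.Set Int) (j : Int) :
    j ∈ ws.foldl (fun S w => es.foldl (fun S il =>
        if !(PySem.Set.contains S il.1) && cond w il.2 then PySem.Set.add S il.1 else S) S) S
      ↔ j ∈ S ∨ ∃ il ∈ es, il.1 = j ∧ ∃ w ∈ ws, cond w il.2 = true := by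
  induction ws generalizing S with
  | nil => simp
  | cons w ws ih =>
    simp only [List.foldl_cons]
    rw [ih]
    simp only [pv_mem_inner (q := fun a => cond w a)]
    constructor
    · rintro (⟨h | ⟨il, hil, rfl, hq⟩⟩ | ⟨il, hil, rfl, w', hw', hq⟩)
      · exact Or.inl h
      · exact Or.inr ⟨il, hil, rfl, w, List.mem_cons_self .., hq⟩
      · exact Or.inr ⟨il, hil, rfl, w', List.mem_cons_of_mem _ hw', hq⟩
    · rintro (h | ⟨il, hil, rfl, w', hw', hq⟩)
      · exact Or.inl (Or.inl h)
      · rcases List.mem_cons.mp hw' with rfl | hw'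
        · exact Or.inl (Or.inr ⟨il, hil, rfl, hq⟩)
        · exact Or.inr ⟨il, hil, rfl, w', hw', hq⟩

-- Filtering the enumeration by a set that agrees pointwise with the record predicate
-- and projecting the records is filtering the records.
theorem pv_filter_enum {α : Type} (P : α → Bool) (S : PySem.Set Int)
    (xs : List α) (s : Int)
    (h : ∀ il ∈ PySem.List.enumerate xs s, PySem.Set.contains S il.1 = P il.2) :
    ((PySem.List.enumerate xs s).filter (fun il => PySem.Set.contains S il.1)).map (·.2)
      = xs.filter P := by
  induction xs generalizing s with
  | nil => simp [PySem.List.enumerate_nil]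
  | cons x xs ih =>
    rw [PySem.List.enumerate_cons] at h ⊢
    have hx : PySem.Set.contains S s = P x := h (s, x) (List.mem_cons_self ..)
    rw [List.filter_cons, List.filter_cons]
    simp only [hx]
    by_cases hp : P x = true
    · rw [if_pos hp, if_pos hp, List.map_cons,
        ih (s + 1) (fun il hil => h il (List.mem_cons_of_mem _ hil))]
    · rw [if_neg hp, if_neg hp, ih (s + 1) (fun il hil => h il (List.mem_cons_of_mem _ hil))]

-- ===== VERDICT (by name: the statement is the Claim_ definition above) =====
theorem filtrar_palavras_chave_py_spec : Claim_equal_filtrar_palavras_chave_py := by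
  intro licitacoes palavras _
  unfold Spec_filtrar_palavras_chave_py filtrar_palavras_chave_py filtrar_palavras_chave_py_alt
  set ws := PySem.Str.split₀ (PySem.Str.lower palavras) with hws
  set cond : String → List (String × String) → Bool := fun palavra l =>
    PySem.Str.isIn palavra (PySem.Str.lower (PySem.Dict.getD ⟨l⟩ "titulo" "")) ||
    PySem.Str.isIn palavra (PySem.Str.lower (PySem.Dict.getD ⟨l⟩ "objeto" "")) with hcond
  set P : List (String × String) → Bool := fun l => ws.any (fun w => cond w l) with hP
  set marcados := ws.foldl (fun marcados palavra =>
      (PySem.List.enumerate licitacoes).foldl (fun marcados il =>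
        if !(PySem.Set.contains marcados il.1) && cond palavra il.2 then
          PySem.Set.add marcados il.1
        else marcados) marcados) PySem.Set.empty with hm
  rw [PySem.List.foldl_append_if (p := fun il => PySem.Set.contains marcados il.1)
    (f := fun il : Int × List (String × String) => il.2), List.nil_append]
  refine (pv_filter_enum P marcados licitacoes 0 ?_).symm
  intro il hil
  rcases (PySem.List.mem_enumerate_iff _ _ _).mp hil with ⟨k, hk, rfl⟩
  have hmem : ((0 : Int) + k) ∈ marcados ↔
      ∃ il' ∈ PySem.List.enumerate licitacoes 0, il'.1 = (0 : Int) + k ∧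
        ∃ w ∈ ws, cond w il'.2 = true := by
    rw [hm, pv_mem_outer]
    simp [PySem.Set.empty]
  have hval : (∃ il' ∈ PySem.List.enumerate licitacoes 0, il'.1 = (0 : Int) + k ∧
      ∃ w ∈ ws, cond w il'.2 = true) ↔ P licitacoes[k] = true := by
    constructor
    · rintro ⟨il', hil', heq, hw⟩
      rcases (PySem.List.mem_enumerate_iff _ _ _).mp hil' with ⟨k', hk', rfl⟩
      have : k' = k := by omega
      subst this
      exact List.any_eq_true.mpr hw
    · intro hp
      exact ⟨((0 : Int) + k, licitacoes[k]), (PySem.List.mem_enumerate_iff _ _ _).mpr ⟨k, hk, rfl⟩,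
        rfl, List.any_eq_true.mp hp⟩
  by_cases hp : P licitacoes[k] = true
  · rw [hp]
    exact (PySem.Set.contains_iff _ _).mpr (hmem.mpr (hval.mpr hp))
  · rw [Bool.eq_false_iff.mpr hp, ← Bool.not_eq_true]
    intro hcont
    exact hp (hval.mp (hmem.mp ((PySem.Set.contains_iff _ _).mp hcont)))
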